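-- pv_equiv track=rewrite | github.com/lars-petter-hauge/aoc | 2021/python/day2/day2.py | run_sub
-- ===== SOURCE A (Python) =====
-- def run_sub(instructions):
--     aim, hor, ver = 0, 0, 0
--     for (direction, length) in instructions:
--         if direction == "forward":
--             hor += length
--             ver += length * aim
--             continue
--         if direction == "up":
--             aim -= length
--         elif direction == "down":
--             aim += length
--         else:
--             raise NotImplementedError(f"Not implemented for direction {direction}")
--     return hor, ver
-- ===== SOURCE B (Python) =====
-- def run_sub(instructions):
--     # Pass 1: validate directions in order and map each instruction to its aim-delta.
--     aim_deltas = []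
--     for (direction, length) in instructions:
--         if direction == "forward":
--             aim_deltas.append(0)
--         elif direction == "up":
--             aim_deltas.append(-length)
--         elif direction == "down":
--             aim_deltas.append(length)
--         else:
--             raise NotImplementedError(f"Not implemented for direction {direction}")
--     # Pass 2: prefix-sum table of the aim BEFORE each step (length n+1, starts at 0).
--     aims = [0]
--     cur = 0
--     for delta in aim_deltas:
--         cur += delta
--         aims.append(cur)
--     # Pass 3: hor = total forward length; ver = sum of length * aim-before over forward steps.
--     hor = sum(length for (direction, length) in instructions if direction == "forward")
--     ver = sum(length * a for ((direction, length), a) in zip(instructions, aims)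
--               if direction == "forward")
--     return hor, ver
-- ===== Notes on version B (the rewrite author's own statement) =====
-- stated objective: alternative
-- what changed: Replaces A's single fused mutable-state loop by a three-pass decomposition: map instructions to aim-deltas (validating in order), build a prefix-sum table of the aim before each step, then compute hor and ver as two independent summations over the instructions zipped with that table.
import Mathlib
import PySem

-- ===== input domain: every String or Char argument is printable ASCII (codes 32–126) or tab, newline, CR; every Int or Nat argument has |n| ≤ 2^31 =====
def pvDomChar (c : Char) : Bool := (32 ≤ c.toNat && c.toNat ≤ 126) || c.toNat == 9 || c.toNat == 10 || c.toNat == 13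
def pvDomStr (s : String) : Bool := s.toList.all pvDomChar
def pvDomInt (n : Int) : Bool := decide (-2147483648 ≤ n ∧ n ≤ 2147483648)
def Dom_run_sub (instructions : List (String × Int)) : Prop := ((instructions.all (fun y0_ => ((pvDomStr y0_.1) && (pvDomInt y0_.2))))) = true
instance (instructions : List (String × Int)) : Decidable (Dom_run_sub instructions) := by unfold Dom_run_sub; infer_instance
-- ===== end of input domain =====

-- B replaces A's single fused loop by a delta-map pass, a prefix-aim table, and two
-- separate summations (objective: alternative decomposition, same O(n) cost).
-- A raises NotImplementedError on unknown directions; Pre_ excludes exactly those inputs.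

-- ===== PORT A =====
-- A's fused loop over state (aim, hor, ver); the unreachable-under-Pre_ raise branch stops with the current (hor, ver).
def run_sub_go (aim hor ver : Int) : List (String × Int) → Int × Int
  | [] => (hor, ver)
  | (direction, length) :: rest =>
    if direction == "forward" then run_sub_go aim (hor + length) (ver + length * aim) rest
    else if direction == "up" then run_sub_go (aim - length) hor ver rest
    else if direction == "down" then run_sub_go (aim + length) hor ver rest
    else (hor, ver)   -- raise NotImplementedError (outside Pre_)

def run_sub (instructions : List (String × Int)) : Int × Int :=
  run_sub_go 0 0 0 instructions

-- ===== PORT B =====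
-- pass 1 of Source B: aim-deltas in order; none models the raise (outside Pre_)
def altDeltas : List (String × Int) → Option (List Int)
  | [] => some []
  | (direction, length) :: rest =>
    if direction == "forward" then (altDeltas rest).map (fun ds => 0 :: ds)
    else if direction == "up" then (altDeltas rest).map (fun ds => (-length) :: ds)
    else if direction == "down" then (altDeltas rest).map (fun ds => length :: ds)
    else none

-- pass 2 of Source B: prefix-sum table of the aim before each step (starts at cur)
def altAims (cur : Int) : List Int → List Int
  | [] => [cur]
  | delta :: rest => cur :: altAims (cur + delta) rest

-- pass 3 of Source B: the two generator sums
def altHor : List (String × Int) → Int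
  | [] => 0
  | (direction, length) :: rest => (if direction == "forward" then length else 0) + altHor rest

def altVer : List ((String × Int) × Int) → Int
  | [] => 0
  | ((direction, length), a) :: rest => (if direction == "forward" then length * a else 0) + altVer rest

def run_sub_alt (instructions : List (String × Int)) : Int × Int :=
  match altDeltas instructions with
  | none => (0, 0)   -- Source B raises here (outside Pre_)
  | some ds => (altHor instructions, altVer (instructions.zip (altAims 0 ds)))

-- ===== PRECONDITION & SPEC =====
-- Pre_ excludes exactly the inputs with an unknown direction, on which A raises NotImplementedError.
def Pre_run_sub (instructions : List (String × Int)) : Prop :=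
  ∀ p ∈ instructions, p.1 = "forward" ∨ p.1 = "up" ∨ p.1 = "down"
instance (instructions : List (String × Int)) : Decidable (Pre_run_sub instructions) := by unfold Pre_run_sub; infer_instance

def pvWitness_run_sub : (List (String × Int)) := [("forward", 5), ("down", 3), ("up", 1), ("forward", 2)]

def Spec_run_sub (instructions : List (String × Int)) (out : Int × Int) : Prop := out = run_sub_alt instructions
instance (instructions : List (String × Int)) (out : Int × Int) : Decidable (Spec_run_sub instructions out) := by unfold Spec_run_sub; infer_instance

-- ===== CLAIM (what is proved, stated in full; the proofs are below) =====
def Claim_equal_run_sub : Prop := ∀ (instructions : List (String × Int)), Dom_run_sub instructions → Pre_run_sub instructions → Spec_run_sub instructions (run_sub instructions)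

-- ===== LEMMAS AND PROOFS =====

-- reference vertical displacement starting from aim `aim` (proof-only helper)
def verF (aim : Int) : List (String × Int) → Int
  | [] => 0
  | (direction, length) :: rest =>
    if direction = "forward" then length * aim + verF aim rest
    else if direction = "up" then verF (aim - length) rest
    else verF (aim + length) rest

theorem run_sub_go_eq (l : List (String × Int)) : ∀ aim hor ver : Int, Pre_run_sub l →
    run_sub_go aim hor ver l = (hor + altHor l, ver + verF aim l) := by
  induction l with
  | nil => intro aim hor ver _; simp [run_sub_go, altHor, verF]
  | cons p rest ih =>
    intro aim hor ver hpre
    obtain ⟨direction, length⟩ := p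
    have hd : direction = "forward" ∨ direction = "up" ∨ direction = "down" :=
      hpre (direction, length) (List.mem_cons_self)
    have hrest : Pre_run_sub rest := fun q hq => hpre q (List.mem_cons_of_mem _ hq)
    rcases hd with h | h | h <;>
      simp [run_sub_go, altHor, verF, h, ih _ _ _ hrest] <;> constructor <;> ring

theorem altDeltas_some (l : List (String × Int)) (h : Pre_run_sub l) :
    ∃ ds, altDeltas l = some ds := by
  induction l with
  | nil => exact ⟨[], rfl⟩
  | cons p rest ih =>
    obtain ⟨direction, length⟩ := p
    have hd : direction = "forward" ∨ direction = "up" ∨ direction = "down" :=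
      h (direction, length) (List.mem_cons_self)
    obtain ⟨ds, hds⟩ := ih (fun q hq => h q (List.mem_cons_of_mem _ hq))
    rcases hd with hh | hh | hh <;> simp [altDeltas, hh, hds]

theorem altVer_eq (l : List (String × Int)) : ∀ (ds : List Int) (cur : Int),
    altDeltas l = some ds → altVer (l.zip (altAims cur ds)) = verF cur l := by
  induction l with
  | nil =>
    intro ds cur h
    simp [altDeltas] at h
    subst h; simp [altVer, verF]
  | cons p rest ih =>
    intro ds cur h
    obtain ⟨direction, length⟩ := p
    by_cases hf : direction = "forward"
    · simp [altDeltas, hf] at h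
      obtain ⟨ds', hds', rfl⟩ := h
      simp [altAims, altVer, verF, hf, ih ds' cur hds']
    · by_cases hu : direction = "up"
      · simp [altDeltas, hu] at h
        obtain ⟨ds', hds', rfl⟩ := h
        simp [altAims, altVer, verF, hu, ih ds' (cur + -length) hds', sub_eq_add_neg]
      · by_cases hdn : direction = "down"
        · simp [altDeltas, hf, hu, hdn] at h
          obtain ⟨ds', hds', rfl⟩ := h
          simp [altAims, altVer, verF, hdn, ih ds' (cur + length) hds']
        · simp [altDeltas, hf, hu, hdn] at h

-- ===== VERDICT (by name: the statement is the Claim_ definition above) =====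
theorem run_sub_spec : Claim_equal_run_sub := by
  intro instructions _ hpre
  unfold Spec_run_sub run_sub run_sub_alt
  obtain ⟨ds, hds⟩ := altDeltas_some instructions hpre
  rw [run_sub_go_eq instructions 0 0 0 hpre]
  simp [hds, altVer_eq instructions ds 0 hds]
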